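-- pv_equiv track=rewrite | github.com/xingjianleng/DBGA | src/dbga/utils.py | duplicate_kmers
-- ===== SOURCE A (Python) =====
-- from collections import Counter
-- from typing import Any, Dict, List, Tuple, Set, Union
--
-- def duplicate_kmers(kmer_seqs: List[List[str]]) -> Set[str]:
--     """Get the duplicate kmers from each sequence
--
--     Parameters
--     ----------
--     kmer_seqs : List[List[str]]
--         list of list of kmers for each sequence
--
--     Returns
--     -------
--     Set[str]
--         the set containing duplicate kmers
--
--     """
--     duplicate_set = set()
--     for kmer_seq in kmer_seqs:
--         counter = Counter(kmer_seq)
--         for key, value in counter.items():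
--             if value > 1:
--                 duplicate_set.add(key)
--     return duplicate_set
-- ===== SOURCE B (Python) =====
-- def duplicate_kmers(kmer_seqs):
--     """Get the duplicate kmers from each sequence.
--
--     Re-implementation: no frequency table at all.  Walk each sequence as a
--     shrinking remainder list; a kmer is duplicated exactly when it occurs
--     again in the remainder after its current position, and the set dedups
--     the repeated hits.
--     """
--     duplicate_set = set()
--     for kmer_seq in kmer_seqs:
--         rest = list(kmer_seq)
--         while rest:
--             kmer = rest.pop(0)
--             if kmer in rest:
--                 duplicate_set.add(kmer)
--     return duplicate_set
-- ===== Notes on version B (the rewrite author's own statement) =====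
-- stated objective: alternative
-- what changed: Replaces the per-sequence frequency table (build a Counter, then a second pass filtering items with count>1) by a single shrinking-remainder scan: each kmer is popped off the front and is a duplicate exactly when it still occurs in the remainder, so no counts are ever computed.
import Mathlib
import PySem

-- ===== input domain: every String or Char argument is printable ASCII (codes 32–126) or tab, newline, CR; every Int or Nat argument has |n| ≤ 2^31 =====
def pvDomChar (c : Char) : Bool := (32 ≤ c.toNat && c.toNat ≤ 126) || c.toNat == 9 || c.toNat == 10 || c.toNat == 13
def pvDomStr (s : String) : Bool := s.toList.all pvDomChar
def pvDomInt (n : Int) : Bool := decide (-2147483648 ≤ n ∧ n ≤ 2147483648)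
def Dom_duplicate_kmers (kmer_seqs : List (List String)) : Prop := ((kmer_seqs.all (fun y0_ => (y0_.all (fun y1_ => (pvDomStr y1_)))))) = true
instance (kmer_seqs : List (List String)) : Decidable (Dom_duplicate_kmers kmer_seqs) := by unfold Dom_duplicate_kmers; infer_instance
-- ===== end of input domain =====

-- B replaces A's per-sequence Counter + items-filter pass by a shrinking-remainder
-- scan ("kmer occurs again in the rest"): alternative algorithm, no counts computed.


-- ===== PORT A =====
def duplicate_kmers (kmer_seqs : List (List String)) : List String :=
  kmer_seqs.foldl (fun duplicate_set kmer_seq =>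
    let counter := PySem.Dict.counter kmer_seq
    counter.items.foldl (fun duplicate_set kv =>
      if kv.2 > 1 then PySem.Set.add duplicate_set kv.1 else duplicate_set) duplicate_set)
    PySem.Set.empty

-- ===== PORT B =====
-- the 'while rest: kmer = rest.pop(0); if kmer in rest: duplicate_set.add(kmer)' loop
def pvScanSeq (rest duplicate_set : List String) : List String :=
  match rest with
  | [] => duplicate_set
  | kmer :: rest =>
      pvScanSeq rest (if kmer ∈ rest then PySem.Set.add duplicate_set kmer else duplicate_set)

def duplicate_kmers_alt (kmer_seqs : List (List String)) : List String :=
  kmer_seqs.foldl (fun duplicate_set kmer_seq => pvScanSeq kmer_seq duplicate_set)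
    PySem.Set.empty

-- ===== PRECONDITION & SPEC =====
def Spec_duplicate_kmers (kmer_seqs : List (List String)) (out : List String) : Prop := out = duplicate_kmers_alt kmer_seqs
instance (kmer_seqs : List (List String)) (out : List String) : Decidable (Spec_duplicate_kmers kmer_seqs out) := by unfold Spec_duplicate_kmers; infer_instance

-- ===== CLAIM (what is proved, stated in full; the proofs are below) =====
def Claim_equal_duplicate_kmers : Prop := ∀ (kmer_seqs : List (List String)), Dom_duplicate_kmers kmer_seqs → Spec_duplicate_kmers kmer_seqs (duplicate_kmers kmer_seqs)

-- ===== LEMMAS AND PROOFS =====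

-- the elements of l not yet in `seen`, first occurrences, in order
def pvNewly (l seen : List String) : List String :=
  match l with
  | [] => []
  | x :: t => if x ∈ seen then pvNewly t seen else x :: pvNewly t (seen ++ [x])

-- the occurrences of a sequence that repeat later (what B's scan adds, in order)
def pvLB (l : List String) : List String :=
  match l with
  | [] => []
  | k :: r => if k ∈ r then k :: pvLB r else pvLB r

theorem pvAdd_eq (s : List String) (x : String) :
    PySem.Set.add s x = if x ∈ s then s else s ++ [x] := by
  simp [PySem.Set.add]

theorem pvFoldl_add_eq_append_newly (l : List String) :
    ∀ seen : List String, l.foldl PySem.Set.add seen = seen ++ pvNewly l seen := by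
  induction l with
  | nil => intro seen; simp [pvNewly]
  | cons x t ih =>
    intro seen
    by_cases hx : x ∈ seen
    · have h1 : PySem.Set.add seen x = seen := by rw [pvAdd_eq]; simp [hx]
      simp only [List.foldl_cons, h1, pvNewly, hx, ite_true]
      exact ih seen
    · have h1 : PySem.Set.add seen x = seen ++ [x] := by rw [pvAdd_eq]; simp [hx]
      simp only [List.foldl_cons, h1, pvNewly, hx, ite_false]
      rw [ih (seen ++ [x])]; simp

theorem pvMem_newly (l : List String) :
    ∀ seen x, x ∈ pvNewly l seen → x ∈ l ∧ x ∉ seen := by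
  induction l with
  | nil => intro seen x h; simp [pvNewly] at h
  | cons y t ih =>
    intro seen x h
    by_cases hy : y ∈ seen
    · simp only [pvNewly, hy, ite_true] at h
      have := ih seen x h
      exact ⟨List.mem_cons_of_mem _ this.1, this.2⟩
    · simp only [pvNewly, hy, ite_false, List.mem_cons] at h
      rcases h with h | h
      · subst h; exact ⟨List.mem_cons_self, hy⟩
      · have := ih (seen ++ [y]) x h
        refine ⟨List.mem_cons_of_mem _ this.1, fun hx => this.2 ?_⟩
        exact List.mem_append.mpr (Or.inl hx)

theorem pvNewly_congr (l : List String) :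
    ∀ s s', (∀ y ∈ l, (y ∈ s ↔ y ∈ s')) → pvNewly l s = pvNewly l s' := by
  induction l with
  | nil => intro s s' _; rfl
  | cons x t ih =>
    intro s s' h
    have hx := h x List.mem_cons_self
    by_cases hxs : x ∈ s
    · have hxs' : x ∈ s' := hx.mp hxs
      simp only [pvNewly, hxs, hxs', ite_true]
      exact ih s s' (fun y hy => h y (List.mem_cons_of_mem _ hy))
    · have hxs' : x ∉ s' := fun h' => hxs (hx.mpr h')
      simp only [pvNewly, hxs, hxs', ite_false]
      congr 1
      apply ih
      intro y hy
      simp only [List.mem_append, List.mem_singleton]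
      constructor
      · rintro (h1 | h1)
        · exact Or.inl ((h y (List.mem_cons_of_mem _ hy)).mp h1)
        · exact Or.inr h1
      · rintro (h1 | h1)
        · exact Or.inl ((h y (List.mem_cons_of_mem _ hy)).mpr h1)
        · exact Or.inr h1

theorem pvNewly_congr_filter (c : String → Bool) (l : List String) :
    ∀ s s', (∀ y ∈ l, c y = true → (y ∈ s ↔ y ∈ s')) →
      (pvNewly l s).filter c = (pvNewly l s').filter c := by
  induction l with
  | nil => intro s s' _; rfl
  | cons x t ih =>
    intro s s' h
    have hrec : ∀ a b : List String,
        (∀ y ∈ t, c y = true → (y ∈ a ↔ y ∈ b)) →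
        (pvNewly t a).filter c = (pvNewly t b).filter c :=
      fun a b hh => ih a b hh
    by_cases hc : c x = true
    · have hx := h x List.mem_cons_self hc
      by_cases hxs : x ∈ s
      · have hxs' : x ∈ s' := hx.mp hxs
        simp only [pvNewly, hxs, hxs', ite_true]
        exact hrec s s' (fun y hy hcy => h y (List.mem_cons_of_mem _ hy) hcy)
      · have hxs' : x ∉ s' := fun h' => hxs (hx.mpr h')
        have h2 : (pvNewly t (s ++ [x])).filter c = (pvNewly t (s' ++ [x])).filter c := by
          apply hrec
          intro y hy hcy
          have := h y (List.mem_cons_of_mem _ hy) hcy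
          simp only [List.mem_append, List.mem_singleton]
          exact ⟨fun h1 => h1.elim (fun a => Or.inl (this.mp a)) Or.inr,
                 fun h1 => h1.elim (fun a => Or.inl (this.mpr a)) Or.inr⟩
        simp only [pvNewly, hxs, hxs', ite_false, List.filter_cons, hc, h2]
    · -- c x = false: x is filtered out wherever it appears; seen may differ by x
      have hstep : ∀ a : List String,
          (pvNewly (x :: t) a).filter c = (pvNewly t (if x ∈ a then a else a ++ [x])).filter c := by
        intro a
        by_cases hxa : x ∈ a
        · simp only [pvNewly, hxa, ite_true]
        · simp only [pvNewly, hxa, ite_false, List.filter_cons, hc]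
          simp
      rw [hstep s, hstep s']
      apply hrec
      intro y hy hcy
      have hyx : y ≠ x := fun hEq => by rw [hEq] at hcy; exact hc hcy
      have h1 := h y (List.mem_cons_of_mem _ hy) hcy
      constructor
      · intro hm
        split at hm
        · split
          · exact h1.mp hm
          · exact List.mem_append.mpr (Or.inl (h1.mp hm))
        · rcases List.mem_append.mp hm with hm | hm
          · split
            · exact h1.mp hm
            · exact List.mem_append.mpr (Or.inl (h1.mp hm))
          · exact absurd (List.mem_singleton.mp hm) hyx
      · intro hm
        split at hm
        · split
          · exact h1.mpr hm
          · exact List.mem_append.mpr (Or.inl (h1.mpr hm))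
        · rcases List.mem_append.mp hm with hm | hm
          · split
            · exact h1.mpr hm
            · exact List.mem_append.mpr (Or.inl (h1.mpr hm))
          · exact absurd (List.mem_singleton.mp hm) hyx

theorem pvNewly_filter (c : String → Bool) (l : List String) :
    ∀ s, pvNewly (l.filter c) s = (pvNewly l s).filter c := by
  induction l with
  | nil => intro s; rfl
  | cons x t ih =>
    intro s
    by_cases hc : c x = true
    · by_cases hxs : x ∈ s
      · simp only [List.filter_cons, hc, ite_true, pvNewly, hxs]
        exact ih s
      · simp only [List.filter_cons, hc, ite_true, pvNewly, hxs, ite_false, List.filter_cons]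
        rw [ih (s ++ [x])]
    · have hcf : c x = false := by revert hc; cases c x <;> simp
      simp only [List.filter_cons, hcf, Bool.false_eq_true, ite_false]
      rw [ih s]
      by_cases hxs : x ∈ s
      · simp only [pvNewly, hxs, ite_true]
      · simp only [pvNewly, hxs, ite_false, List.filter_cons, hcf]
        simp only [Bool.false_eq_true, ite_false]
        apply pvNewly_congr_filter
        intro y hy hcy
        have hyx : y ≠ x := fun hEq => by rw [hEq] at hcy; exact hc hcy
        simp [hyx]

theorem pvNewly_newly (l : List String) :
    ∀ s t, (∀ y ∈ l, y ∈ t → y ∈ s) → pvNewly (pvNewly l t) s = pvNewly l s := by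
  induction l with
  | nil => intro s t _; rfl
  | cons x r ih =>
    intro s t h
    by_cases hxt : x ∈ t
    · have hxs : x ∈ s := h x List.mem_cons_self hxt
      simp only [pvNewly, hxt, hxs, ite_true]
      exact ih s t (fun y hy => h y (List.mem_cons_of_mem _ hy))
    · by_cases hxs : x ∈ s
      · simp only [pvNewly, hxt, ite_false, hxs, ite_true]
        apply ih
        intro y hy hyt
        rcases List.mem_append.mp hyt with h1 | h1
        · exact h y (List.mem_cons_of_mem _ hy) h1
        · rw [List.mem_singleton.mp h1]; exact hxs
      · simp only [pvNewly, hxt, ite_false, hxs]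
        congr 1
        apply ih
        intro y hy hyt
        rcases List.mem_append.mp hyt with h1 | h1
        · exact List.mem_append.mpr (Or.inl (h y (List.mem_cons_of_mem _ hy) h1))
        · exact List.mem_append.mpr (Or.inr h1)

-- B's add-list, deduped relative to seen, is the duplicated first occurrences
theorem pvNewly_pvLB (l : List String) :
    ∀ s, pvNewly (pvLB l) s = (pvNewly l s).filter (fun k => decide (1 < l.count k)) := by
  induction l with
  | nil => intro s; rfl
  | cons k r ih =>
    intro s
    have hcount : ∀ x, x ≠ k → (k :: r).count x = r.count x := by
      intro x hx; simp [Ne.symm hx]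
    by_cases hkr : k ∈ r
    · have hk2 : 1 < (k :: r).count k := by
        have : 1 ≤ r.count k := List.one_le_count_iff.mpr hkr
        simp; omega
      by_cases hks : k ∈ s
      · simp only [pvLB, hkr, ite_true, pvNewly, hks, ite_true]
        rw [ih s]
        apply List.filter_congr
        intro x hx
        have hxs : x ∉ s := (pvMem_newly r s x hx).2
        have hxk : x ≠ k := fun hEq => hxs (hEq ▸ hks)
        simp [hcount x hxk]
      · simp only [pvLB, hkr, ite_true, pvNewly, hks, ite_false, List.filter_cons]
        simp only [hk2, decide_true, ite_true]
        congr 1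
        rw [ih (s ++ [k])]
        apply List.filter_congr
        intro x hx
        have hxs : x ∉ s ++ [k] := (pvMem_newly r (s ++ [k]) x hx).2
        have hxk : x ≠ k := fun hEq => hxs (List.mem_append.mpr (Or.inr (by simp [hEq])))
        simp [hcount x hxk]
    · have hk1 : ¬ 1 < (k :: r).count k := by
        have : r.count k = 0 := List.count_eq_zero.mpr hkr
        simp [this]
      by_cases hks : k ∈ s
      · simp only [pvLB, hkr, ite_false, pvNewly, hks, ite_true]
        rw [ih s]
        apply List.filter_congr
        intro x hx
        have hxr : x ∈ r := (pvMem_newly r s x hx).1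
        have hxk : x ≠ k := fun hEq => hkr (hEq ▸ hxr)
        simp [hcount x hxk]
      · simp only [pvLB, hkr, ite_false, pvNewly, hks, List.filter_cons]
        simp only [hk1, decide_false]
        have hseen : pvNewly r s = pvNewly r (s ++ [k]) := by
          apply pvNewly_congr
          intro y hy
          have hyk : y ≠ k := fun hEq => hkr (hEq ▸ hy)
          simp [hyk]
        rw [ih s, hseen]
        apply List.filter_congr
        intro x hx
        have hxr : x ∈ r := (pvMem_newly r (s ++ [k]) x hx).1
        have hxk : x ≠ k := fun hEq => hkr (hEq ▸ hxr)
        simp [hcount x hxk]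

theorem pvFoldl_if_filter (c : String → Bool) (l : List String) :
    ∀ dup, l.foldl (fun d k => if c k then PySem.Set.add d k else d) dup
      = (l.filter c).foldl PySem.Set.add dup := by
  induction l with
  | nil => intro dup; rfl
  | cons x t ih =>
    intro dup
    by_cases hc : c x = true
    · simp only [List.foldl_cons, List.filter_cons, hc, ite_true, List.foldl_cons]
      exact ih _
    · simp only [List.foldl_cons, List.filter_cons, hc]
      simp only [Bool.false_eq_true, ite_false]
      exact ih dup

theorem pvScanSeq_eq_foldl (l : List String) :
    ∀ dup, pvScanSeq l dup = (pvLB l).foldl PySem.Set.add dup := by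
  induction l with
  | nil => intro dup; rfl
  | cons k r ih =>
    intro dup
    by_cases hkr : k ∈ r
    · simp only [pvScanSeq, hkr, ite_true, pvLB, List.foldl_cons]
      exact ih _
    · simp only [pvScanSeq, hkr, ite_false, pvLB]
      exact ih dup

theorem pvOfList_eq_newly (l : List String) :
    PySem.Set.ofList l = pvNewly l [] := by
  have := pvFoldl_add_eq_append_newly l []
  simpa [PySem.Set.ofList_eq_foldl] using this

-- the per-sequence loop bodies agree
theorem pvInner_eq (kmer_seq dup : List String) :
    (PySem.Dict.counter kmer_seq).items.foldl (fun d kv =>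
        if kv.2 > 1 then PySem.Set.add d kv.1 else d) dup
      = pvScanSeq kmer_seq dup := by
  rw [PySem.Dict.items_counter, List.foldl_map, pvScanSeq_eq_foldl]
  have hcond : ∀ dup' k, (if ((kmer_seq.count k : Int)) > 1 then PySem.Set.add dup' k else dup')
      = (if decide (1 < kmer_seq.count k) = true then PySem.Set.add dup' k else dup') := by
    intro dup' k
    by_cases h : 1 < kmer_seq.count k
    · rw [if_pos (by exact_mod_cast h), if_pos (by simp [h])]
    · rw [if_neg (by exact_mod_cast h), if_neg (by simp [h])]
  calc (PySem.Set.ofList kmer_seq).foldl (fun d k =>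
          if ((kmer_seq.count k : Int)) > 1 then PySem.Set.add d k else d) dup
      = (PySem.Set.ofList kmer_seq).foldl (fun d k =>
          if decide (1 < kmer_seq.count k) = true then PySem.Set.add d k else d) dup := by
        apply PySem.List.foldl_congr_mem; intro acc x _; exact hcond acc x
    _ = ((PySem.Set.ofList kmer_seq).filter (fun k => decide (1 < kmer_seq.count k))).foldl
          PySem.Set.add dup := pvFoldl_if_filter _ _ dup
    _ = (pvLB kmer_seq).foldl PySem.Set.add dup := by
        rw [pvFoldl_add_eq_append_newly, pvFoldl_add_eq_append_newly]
        congr 1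
        rw [pvOfList_eq_newly, pvNewly_filter, pvNewly_newly _ _ _ (by intro y _ h; simp at h),
          pvNewly_pvLB]

theorem pvOuter_eq (kmer_seqs : List (List String)) :
    ∀ dup : List String,
    kmer_seqs.foldl (fun duplicate_set kmer_seq =>
        (PySem.Dict.counter kmer_seq).items.foldl (fun d kv =>
          if kv.2 > 1 then PySem.Set.add d kv.1 else d) duplicate_set) dup
      = kmer_seqs.foldl (fun duplicate_set kmer_seq => pvScanSeq kmer_seq duplicate_set) dup := by
  induction kmer_seqs with
  | nil => intro dup; rfl
  | cons s t ih =>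
    intro dup
    simp only [List.foldl_cons]
    rw [pvInner_eq]
    exact ih _

-- ===== VERDICT (by name: the statement is the Claim_ definition above) =====
theorem duplicate_kmers_spec : Claim_equal_duplicate_kmers := by
  intro kmer_seqs _
  unfold Spec_duplicate_kmers duplicate_kmers duplicate_kmers_alt
  exact pvOuter_eq kmer_seqs PySem.Set.empty
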